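-- pv_equiv track=rewrite | github.com/pablomarcel/control-systems | transient_analysis/routhTool/utils.py | parse_coeffs
-- ===== SOURCE A (Python) =====
-- def parse_coeffs(raw: str) -> list[str]:
--     """Parse a coefficient string into individual token strings.
--
--     Accepted separators are commas, semicolons, and whitespace. Square brackets
--     are ignored so users can pass values such as ``[1, 5, 6, K]`` from the CLI.
--
--     Args:
--         raw: Coefficients in descending polynomial order.
--
--     Returns:
--         A list of non-empty coefficient tokens.
--     """
--     if raw is None:
--         raise ValueError("Coefficient text cannot be None.")
--
--     text = str(raw).strip()
--     if not text:
--         raise ValueError("Coefficient text cannot be empty.")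
--
--     text = text.replace(";", " ").replace("[", " ").replace("]", " ").replace(",", " ")
--     tokens = [token for token in text.split() if token.strip()]
--     if not tokens:
--         raise ValueError("No coefficient tokens were found.")
--     return tokens
-- ===== SOURCE B (Python) =====
-- def parse_coeffs(raw: str) -> list[str]:
--     """Single-pass scanner: flush a running buffer at every separator char."""
--     if raw is None:
--         raise ValueError("Coefficient text cannot be None.")
--
--     text = str(raw).strip()
--     if not text:
--         raise ValueError("Coefficient text cannot be empty.")
--
--     tokens = []
--     buf = []
--     for c in text:
--         if c in ";[]," or c.isspace():
--             if buf:
--                 tokens.append("".join(buf))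
--                 buf = []
--         else:
--             buf.append(c)
--     if buf:
--         tokens.append("".join(buf))
--
--     if not tokens:
--         raise ValueError("No coefficient tokens were found.")
--     return tokens
-- ===== Notes on version B (the rewrite author's own statement) =====
-- stated objective: alternative
-- what changed: Replaces the four str.replace passes plus str.split plus a filtering comprehension with a single left-to-right scan that flushes a character buffer at every separator (semicolons, square brackets, commas, whitespace).
import Mathlib
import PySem

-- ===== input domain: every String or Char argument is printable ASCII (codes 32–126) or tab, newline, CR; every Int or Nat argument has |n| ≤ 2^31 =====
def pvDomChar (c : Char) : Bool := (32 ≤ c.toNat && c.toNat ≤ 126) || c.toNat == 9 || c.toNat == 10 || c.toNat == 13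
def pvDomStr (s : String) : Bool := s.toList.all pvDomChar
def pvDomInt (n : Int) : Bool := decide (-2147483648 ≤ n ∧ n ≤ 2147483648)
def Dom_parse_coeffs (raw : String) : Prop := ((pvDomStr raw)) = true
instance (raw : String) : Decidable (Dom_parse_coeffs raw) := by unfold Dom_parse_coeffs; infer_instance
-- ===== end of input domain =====

-- B replaces A's replace-then-split pipeline by a single-character scanner (alternative decomposition, same cost).

-- ===== PORT A =====
def parse_coeffs (raw : String) : List String :=
  let text := PySem.Str.strip raw
  if text.toList.isEmpty then []  -- Python: raise ValueError("Coefficient text cannot be empty."); excluded by Pre_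
  else
    let text2 := PySem.Str.replace (PySem.Str.replace (PySem.Str.replace
      (PySem.Str.replace text ";" " ") "[" " ") "]" " ") "," " "
    let tokens := (PySem.Str.split₀ text2).filter
      (fun token => !(PySem.Str.strip token).toList.isEmpty)  -- `if token.strip()`: truthiness of the stripped string
    if tokens.isEmpty then []  -- Python: raise ValueError("No coefficient tokens were found."); excluded by Pre_
    else tokens

-- ===== PORT B =====
-- `c in ";[]," or c.isspace()` from Source B
def pvDelimB (c : Char) : Bool :=
  c == ';' || c == '[' || c == ']' || c == ',' || PySem.Chars.isspace c

-- the for-loop of Source B: buffer of pending chars, tokens appended on each flush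
-- (tokens kept as List Char here; the "".join happens in parse_coeffs_alt via String.ofList)
def pvScanB : List Char → List Char → List (List Char) → List (List Char)
  | [], buf, toks => if buf.isEmpty then toks else toks ++ [buf]
  | c :: rest, buf, toks =>
    if pvDelimB c then
      if buf.isEmpty then pvScanB rest [] toks else pvScanB rest [] (toks ++ [buf])
    else pvScanB rest (buf ++ [c]) toks

def parse_coeffs_alt (raw : String) : List String :=
  let text := PySem.Str.strip raw
  if text.toList.isEmpty then []  -- Python: raise ValueError; excluded by Pre_
  else
    let tokens := (pvScanB text.toList [] []).map String.ofList
    if tokens.isEmpty then []  -- Python: raise ValueError; excluded by Pre_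
    else tokens

-- ===== PRECONDITION & SPEC =====
-- Pre_ excludes exactly the inputs where Python A raises ValueError: strings with no
-- coefficient character at all (every char is a semicolon, square bracket, comma or
-- whitespace, which also covers the all-whitespace/empty string).
def Pre_parse_coeffs (raw : String) : Prop :=
  raw.toList.any
    (fun c => !(c == ';' || c == '[' || c == ']' || c == ',' || PySem.Chars.isspace c)) = true
instance (raw : String) : Decidable (Pre_parse_coeffs raw) := by
  unfold Pre_parse_coeffs; infer_instance

def pvWitness_parse_coeffs : String := "[1, 5, 6, K]"

def Spec_parse_coeffs (raw : String) (out : List String) : Prop := out = parse_coeffs_alt raw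
instance (raw : String) (out : List String) : Decidable (Spec_parse_coeffs raw out) := by
  unfold Spec_parse_coeffs; infer_instance

-- ===== CLAIM (what is proved, stated in full; the proofs are below) =====
def Claim_equal_parse_coeffs : Prop :=
  ∀ (raw : String), Dom_parse_coeffs raw → Pre_parse_coeffs raw →
    Spec_parse_coeffs raw (parse_coeffs raw)

-- ===== LEMMAS AND PROOFS =====

-- the single-char-old, single-char-new case of Python str.replace as a map
theorem pv_repl_go (o n : Char) :
    ∀ (l acc : List Char),
      PySem.Chars.replace.go [o] [n] l.length l acc
        = acc.reverse ++ l.map (fun c => if o == c then n else c) := by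
  intro l
  induction l with
  | nil => intro acc; rw [List.length_nil, PySem.Chars.replace.go]; simp
  | cons c t ih =>
      intro acc
      rw [List.length_cons, PySem.Chars.replace.go]
      by_cases h : o = c
      · subst h
        simp [List.isPrefixOf, ih]
      · have hb : (o == c) = false := by simp [h]
        simp [List.isPrefixOf, hb, ih]
        exact fun h' => absurd h' h

theorem pv_replace_single (l : List Char) (o n : Char) :
    PySem.Chars.replace l [o] [n] = l.map (fun c => if o == c then n else c) := by
  simp [PySem.Chars.replace, pv_repl_go]

-- the composition of the four replaces, per character
def pvGmap (c : Char) : Char :=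
  (fun c => if ',' == c then ' ' else c)
    ((fun c => if ']' == c then ' ' else c)
      ((fun c => if '[' == c then ' ' else c)
        ((fun c => if ';' == c then ' ' else c) c)))

theorem pvGmap_keep (c : Char) (h : pvDelimB c = false) :
    pvGmap c = c ∧ PySem.Chars.isspace c = false := by
  simp only [pvDelimB, Bool.or_eq_false_iff, beq_eq_false_iff_ne] at h
  obtain ⟨⟨⟨⟨h1, h2⟩, h3⟩, h4⟩, h5⟩ := h
  refine ⟨?_, h5⟩
  simp [pvGmap, (Ne.symm h1), (Ne.symm h2), (Ne.symm h3), (Ne.symm h4)]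

theorem pvGmap_delim (c : Char) (h : pvDelimB c = true) :
    PySem.Chars.isspace (pvGmap c) = true := by
  simp only [pvDelimB, Bool.or_eq_true, beq_iff_eq] at h
  rcases h with ((((h | h) | h) | h) | h)
  · subst h; decide
  · subst h; decide
  · subst h; decide
  · subst h; decide
  · by_cases h1 : c = ';'
    · subst h1; decide
    by_cases h2 : c = '['
    · subst h2; decide
    by_cases h3 : c = ']'
    · subst h3; decide
    by_cases h4 : c = ','
    · subst h4; decide
    have : pvGmap c = c := by
      simp [pvGmap, Ne.symm h1, Ne.symm h2, Ne.symm h3, Ne.symm h4]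
    rw [this]; exact h

-- pvScanB only ever appends to its token accumulator
theorem pv_scan_acc :
    ∀ (s buf : List Char) (toks : List (List Char)),
      pvScanB s buf toks = toks ++ pvScanB s buf [] := by
  intro s
  induction s with
  | nil => intro buf toks; simp only [pvScanB]; split <;> simp
  | cons c rest ih =>
      intro buf toks
      simp only [pvScanB]
      split
      · split
        · exact ih _ _
        · rw [ih [] (toks ++ [buf]), ih [] ([] ++ [buf])]; simp
      · exact ih _ _

-- the heart: Python's split() on the replaced text IS B's scanner on the original text
theorem pv_main :
    ∀ (s buf : List Char) (acc : List (List Char)),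
      PySem.Chars.split₀.go (s.map pvGmap) buf.reverse acc
        = acc.reverse ++ pvScanB s buf [] := by
  intro s
  induction s with
  | nil =>
      intro buf acc
      rw [List.map_nil, PySem.Chars.split₀.go]
      simp only [pvScanB]
      by_cases hb : buf = [] <;> simp [hb]
  | cons c rest ih =>
      intro buf acc
      rw [List.map_cons, PySem.Chars.split₀.go]
      by_cases hd : pvDelimB c = true
      · rw [pvGmap_delim c hd]
        simp only [pvScanB, hd, if_pos]
        by_cases hb : buf = []
        · subst hb
          simpa using ih [] acc
        · have hbe : buf.reverse.isEmpty = false := by simp [hb]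
          have h2 := ih [] (buf :: acc)
          simp only [List.reverse_nil] at h2
          have h3 := pv_scan_acc rest [] ([] ++ [buf])
          simp only [List.nil_append] at h3
          simp [hbe, hb, h2, h3]
      · have hd' : pvDelimB c = false := by simpa using hd
        obtain ⟨hg, hs⟩ := pvGmap_keep c hd'
        rw [hg, hs]
        simp only [Bool.false_eq_true, if_false]
        have : (c :: buf.reverse) = (buf ++ [c]).reverse := by simp
        rw [this, ih (buf ++ [c]) acc]
        simp [pvScanB, hd']

-- every token produced by the scanner is non-empty and whitespace-free
theorem pv_scan_tokens :
    ∀ (s buf : List Char) (toks : List (List Char)),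
      (∀ t ∈ toks, t ≠ [] ∧ ∀ c ∈ t, PySem.Chars.isspace c = false) →
      (∀ c ∈ buf, PySem.Chars.isspace c = false) →
      ∀ t ∈ pvScanB s buf toks, t ≠ [] ∧ ∀ c ∈ t, PySem.Chars.isspace c = false := by
  intro s
  induction s with
  | nil =>
      intro buf toks htoks hbuf t ht
      simp only [pvScanB] at ht
      split at ht
      · exact htoks t ht
      · rename_i hb
        rcases List.mem_append.1 ht with h | h
        · exact htoks t h
        · simp only [List.mem_singleton] at h
          subst h
          exact ⟨by simpa using hb, hbuf⟩
  | cons c rest ih =>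
      intro buf toks htoks hbuf t ht
      simp only [pvScanB] at ht
      split at ht
      · rename_i hd
        split at ht
        · exact ih [] toks htoks (by simp) t ht
        · rename_i hb
          refine ih [] (toks ++ [buf]) ?_ (by simp) t ht
          intro u hu
          rcases List.mem_append.1 hu with h | h
          · exact htoks u h
          · simp only [List.mem_singleton] at h
            subst h
            exact ⟨by simpa using hb, hbuf⟩
      · rename_i hd
        have hd' : pvDelimB c = false := by simpa using hd
        refine ih (buf ++ [c]) toks htoks ?_ t ht
        intro u hu
        rcases List.mem_append.1 hu with h | h
        · exact hbuf u h
        · simp only [List.mem_singleton] at h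
          simp [h, (pvGmap_keep c hd').2]

theorem pv_dropWhile_id (t : List Char) (h : ∀ c ∈ t, PySem.Chars.isspace c = false) :
    List.dropWhile PySem.Chars.isspace t = t := by
  cases t with
  | nil => rfl
  | cons c u => simp [h c (by simp)]

theorem pv_strip_id (t : List Char) (h : ∀ c ∈ t, PySem.Chars.isspace c = false) :
    PySem.Chars.strip t = t := by
  unfold PySem.Chars.strip PySem.Chars.lstrip PySem.Chars.rstrip
  rw [pv_dropWhile_id t h, pv_dropWhile_id t.reverse (fun c hc => h c (List.mem_reverse.1 hc))]
  simp

-- A and B agree on EVERY string (at the raise points both ports return [])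
theorem pv_key (text : String) :
    (PySem.Str.split₀ (PySem.Str.replace (PySem.Str.replace (PySem.Str.replace
      (PySem.Str.replace text ";" " ") "[" " ") "]" " ") "," " ")).filter
      (fun token => !(PySem.Str.strip token).toList.isEmpty)
    = (pvScanB text.toList [] []).map String.ofList := by
  have htl : (PySem.Str.replace (PySem.Str.replace (PySem.Str.replace
      (PySem.Str.replace text ";" " ") "[" " ") "]" " ") "," " ").toList
      = text.toList.map pvGmap := by
    simp only [PySem.Str.toList_replace]
    rw [show (";" : String).toList = [';'] from rfl, show ("[" : String).toList = ['['] from rfl,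
      show ("]" : String).toList = [']'] from rfl, show ("," : String).toList = [','] from rfl,
      show (" " : String).toList = [' '] from rfl]
    rw [pv_replace_single, pv_replace_single, pv_replace_single, pv_replace_single]
    rw [List.map_map, List.map_map, List.map_map]
    rfl
  have hsplit : List.map String.toList (PySem.Str.split₀ (PySem.Str.replace (PySem.Str.replace
      (PySem.Str.replace (PySem.Str.replace text ";" " ") "[" " ") "]" " ") "," " "))
      = pvScanB text.toList [] [] := by
    rw [PySem.Str.split₀_map_toList, htl]
    rw [PySem.Chars.split₀]
    simpa using pv_main text.toList [] []
  have htoks : ∀ t ∈ pvScanB text.toList [] [],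
      t ≠ [] ∧ ∀ c ∈ t, PySem.Chars.isspace c = false :=
    pv_scan_tokens text.toList [] [] (by simp) (by simp)
  have hfilter : (PySem.Str.split₀ (PySem.Str.replace (PySem.Str.replace
      (PySem.Str.replace (PySem.Str.replace text ";" " ") "[" " ") "]" " ") "," " ")).filter
      (fun token => !(PySem.Str.strip token).toList.isEmpty)
      = PySem.Str.split₀ (PySem.Str.replace (PySem.Str.replace
      (PySem.Str.replace (PySem.Str.replace text ";" " ") "[" " ") "]" " ") "," " ") := by
    rw [List.filter_eq_self]
    intro tok hmem
    have hmem' : tok.toList ∈ pvScanB text.toList [] [] := by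
      rw [← hsplit]; exact List.mem_map_of_mem hmem
    obtain ⟨hne, hns⟩ := htoks tok.toList hmem'
    rw [Bool.not_eq_eq_eq_not, Bool.not_true]
    rw [PySem.Str.toList_strip, pv_strip_id tok.toList hns]
    simpa using hne
  rw [hfilter]
  have hinj : ∀ (l1 : List String) (l2 : List (List Char)),
      List.map String.toList l1 = l2 → l1 = l2.map String.ofList := by
    intro l1
    induction l1 with
    | nil => intro l2 h; rw [← h]; rfl
    | cons a l ih =>
        intro l2 h
        cases l2 with
        | nil => simp at h
        | cons b l2' =>
            simp only [List.map_cons, List.cons.injEq] at h ⊢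
            exact ⟨by rw [← h.1, String.ofList_toList], ih l2' h.2⟩
  exact hinj _ _ hsplit

theorem pv_eq_all (raw : String) : parse_coeffs raw = parse_coeffs_alt raw := by
  unfold parse_coeffs parse_coeffs_alt
  simp only
  rw [pv_key (PySem.Str.strip raw)]

-- ===== VERDICT (by name: the statement is the Claim_ definition above) =====
theorem parse_coeffs_spec : Claim_equal_parse_coeffs := by
  intro raw _ _
  unfold Spec_parse_coeffs
  exact pv_eq_all raw
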